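-- pv_equiv track=rewrite | github.com/seligman/microkeys | get_micropython.py | fix_print
-- ===== SOURCE A (Python) =====
-- def fix_print(data):
--     if data is None:
--         return "py/modbuiltins.c"
--
--     data = data.split("\n")
--     for i, row in enumerate(data):
--         if "mp_obj_t mp_builtin_print" in row:
--             data = data[:i+1] + [
--                 "// TODO: return mp_const_none;",
--             ] + data[i+1:]
--             break
--     data = "\n".join(data)
--     return data
-- ===== SOURCE B (Python) =====
-- def fix_print(data):
--     if data is None:
--         return "py/modbuiltins.c"
--
--     pos = data.find("mp_obj_t mp_builtin_print")
--     if pos == -1: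
--         return data
--     nl = data.find("\n", pos)
--     if nl == -1:
--         return data + "\n// TODO: return mp_const_none;"
--     return data[:nl] + "\n// TODO: return mp_const_none;" + data[nl:]
-- ===== Notes on version B (the rewrite author's own statement) =====
-- stated objective: simpler
-- what changed: B drops A's split-into-lines / enumerate-loop / rejoin reconstruction and instead locates the marker with one substring find, finds the end of that line with a second find, and inserts the TODO line by string slicing.
import Mathlib
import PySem

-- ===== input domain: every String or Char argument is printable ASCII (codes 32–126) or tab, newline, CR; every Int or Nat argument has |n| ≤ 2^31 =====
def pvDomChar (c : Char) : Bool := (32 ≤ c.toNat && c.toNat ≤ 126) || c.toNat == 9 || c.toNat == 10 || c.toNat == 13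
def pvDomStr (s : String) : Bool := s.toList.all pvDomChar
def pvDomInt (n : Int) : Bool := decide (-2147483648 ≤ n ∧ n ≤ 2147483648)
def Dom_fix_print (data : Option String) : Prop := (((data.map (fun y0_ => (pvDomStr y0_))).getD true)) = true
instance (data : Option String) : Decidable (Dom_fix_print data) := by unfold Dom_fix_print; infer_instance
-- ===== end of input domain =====

-- B replaces A's split-into-lines / enumerate / rebuild-and-join pass by a direct substring
-- find of the marker and a single slice-insert after that line (objective: simpler).

-- ===== PORT A =====
-- A's for-loop with enumerate and break: first row containing the marker triggers the
-- slice-insertion of the TODO line; `all` is the full line list, `rows` the remaining rows.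
def fixPrintGoA (all : List String) : List String → Nat → List String
  | [], _ => all
  | row :: rs, i =>
    if PySem.Str.isIn "mp_obj_t mp_builtin_print" row = true then
      PySem.List.slice all none (some ((i : Int) + 1)) ++ ["// TODO: return mp_const_none;"]
        ++ PySem.List.slice all (some ((i : Int) + 1)) none
    else
      fixPrintGoA all rs (i + 1)

def fix_print (data : Option String) : String :=
  match data with
  | none => "py/modbuiltins.c"
  | some d =>
    let lines := (PySem.Str.split? d "\n").getD []   -- sep "\n" ≠ "", so split? is always some
    PySem.Str.join "\n" (fixPrintGoA lines lines 0)

-- ===== PORT B =====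
def fix_print_alt (data : Option String) : String :=
  match data with
  | none => "py/modbuiltins.c"
  | some d =>
    let pos := PySem.Str.find d "mp_obj_t mp_builtin_print"
    if pos = -1 then d
    else
      let nl := PySem.Str.findFrom d "\n" pos
      if nl = -1 then d ++ "\n// TODO: return mp_const_none;"
      else PySem.Str.slice d none (some nl) ++ "\n// TODO: return mp_const_none;"
        ++ PySem.Str.slice d (some nl) none

-- ===== PRECONDITION & SPEC =====
def Spec_fix_print (data : Option String) (out : String) : Prop := out = fix_print_alt data
instance (data : Option String) (out : String) : Decidable (Spec_fix_print data out) := by unfold Spec_fix_print; infer_instance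

-- ===== CLAIM (what is proved, stated in full; the proofs are below) =====
def Claim_equal_fix_print : Prop := ∀ (data : Option String), Dom_fix_print data → Spec_fix_print data (fix_print data)

-- ===== LEMMAS AND PROOFS =====

-- the marker and the inserted line, as character lists
def Mk : List Char := "mp_obj_t mp_builtin_print".toList
def Tline : List Char := "// TODO: return mp_const_none;".toList

-- char-level mirror of B
def fBchars (cs : List Char) : List Char :=
  let p := PySem.Chars.find cs Mk
  if p = -1 then cs
  else
    let nl := PySem.Chars.findFrom cs ['\n'] p none
    if nl = -1 then cs ++ '\n' :: Tline
    else cs.take nl.toNat ++ ('\n' :: Tline) ++ cs.drop nl.toNat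

-- char-level mirror of A's loop (take/drop form)
def goC (all : List (List Char)) : List (List Char) → Nat → List (List Char)
  | [], _ => all
  | r :: rs, i =>
    if PySem.Chars.isIn Mk r = true then all.take (i+1) ++ [Tline] ++ all.drop (i+1)
    else goC all rs (i+1)

-- structural form of A's loop
def loopC : List (List Char) → List (List Char)
  | [] => []
  | r :: rs => if PySem.Chars.isIn Mk r = true then r :: Tline :: rs else r :: loopC rs

theorem nl_not_mem_Mk : '\n' ∉ Mk := by decide

theorem go_map (A R : List (List Char)) (i : Nat) :
    fixPrintGoA (A.map String.ofList) (R.map String.ofList) i = (goC A R i).map String.ofList := by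
  induction R generalizing i with
  | nil => simp [fixPrintGoA, goC]
  | cons r rs ih =>
    have hiff : PySem.Str.isIn "mp_obj_t mp_builtin_print" (String.ofList r)
        = PySem.Chars.isIn Mk r := by
      simp only [PySem.Str.isIn_eq, String.toList_ofList]
      rfl
    have hcast : ((i : Int) + 1) = ((i + 1 : Nat) : Int) := by push_cast; ring
    have hT : ("// TODO: return mp_const_none;" : String) = String.ofList Tline := by
      rw [Tline, String.ofList_toList]
    by_cases h : PySem.Chars.isIn Mk r = true
    · simp only [List.map_cons, fixPrintGoA, goC, hiff, h, if_true]
      rw [hcast, PySem.List.slice_to_natCast, PySem.List.slice_from_natCast]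
      simp [List.map_take, List.map_drop, hT]
    · simp only [List.map_cons, fixPrintGoA, goC, hiff, h, Bool.false_eq_true, if_false]
      exact ih (i + 1)

theorem goC_eq_loopC (R A : List (List Char)) (i : Nat) (h : A.drop i = R) :
    goC A R i = A.take i ++ loopC R := by
  induction R generalizing i with
  | nil =>
    have : A.length ≤ i := by
      by_contra hlt
      have := List.drop_eq_nil_iff.mp h
      omega
    simp [goC, loopC, List.take_of_length_le this]
  | cons r rs ih =>
    have hi : i < A.length := by
      by_contra hge
      rw [List.drop_eq_nil_iff.mpr (by omega)] at h
      simp at h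
    have hdrop1 : A.drop (i+1) = rs := by
      have : A.drop (i+1) = (A.drop i).drop 1 := by rw [List.drop_drop]
      rw [this, h]; rfl
    have htake1 : A.take (i+1) = A.take i ++ [r] := by
      have := List.take_add (l := A) (i := i) (j := 1)
      rw [this, h]; rfl
    by_cases hr : PySem.Chars.isIn Mk r = true
    · simp [goC, loopC, hr, htake1, hdrop1]
    · simp only [goC, loopC, hr, if_neg, Bool.false_eq_true, not_false_iff]
      rw [ih (i+1) hdrop1, htake1]
      simp

theorem go_split (l : List Char) : ∀ (fuel : Nat) (cur : List Char) (acc : List (List Char)),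
    l.length < fuel →
    PySem.Chars.splitOn.go ['\n'] fuel l cur acc
      = acc.reverse ++ (l.splitOnP (· == '\n')).modifyHead (cur.reverse ++ ·) := by
  induction l with
  | nil =>
    intro fuel cur acc hf
    match fuel, hf with
    | f + 1, _ =>
      rw [PySem.Chars.splitOn.go.eq_def]
      simp [List.modifyHead]
  | cons c rest ih =>
    intro fuel cur acc hf
    match fuel, hf with
    | f + 1, hf =>
      rw [PySem.Chars.splitOn.go.eq_def]
      by_cases hc : c = '\n'
      · subst hc
        have hpre : List.isPrefixOf ['\n'] ('\n' :: rest) = true := by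
          simp [List.isPrefixOf]
        simp only [hpre, if_true]
        rw [show List.drop (['\n'].length) ('\n' :: rest) = rest from rfl]
        rw [ih f [] (cur.reverse :: acc) (by simp at hf ⊢; omega)]
        rw [List.splitOnP_cons]
        simp [List.modifyHead]
        cases h0 : rest.splitOnP (· == '\n') with
        | nil => exact absurd h0 (List.splitOnP_ne_nil _ _)
        | cons x xs => simp
      · have hpre : List.isPrefixOf ['\n'] (c :: rest) = false := by
          simp [List.isPrefixOf]
          intro h; exact absurd h.symm hc
        simp only [hpre, Bool.false_eq_true, if_false]
        rw [ih f (c :: cur) acc (by simp at hf ⊢; omega)]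
        rw [List.splitOnP_cons, if_neg (by simp [hc])]
        cases h0 : rest.splitOnP (· == '\n') with
        | nil => exact absurd h0 (List.splitOnP_ne_nil _ _)
        | cons x xs => simp [List.modifyHead]

theorem splitOn_bridge (cs : List Char) :
    PySem.Chars.splitOn cs ['\n'] = cs.splitOnP (· == '\n') := by
  unfold PySem.Chars.splitOn
  rw [go_split cs (cs.length + 1) [] [] (by omega)]
  cases h0 : cs.splitOnP (· == '\n') with
  | nil => exact absurd h0 (List.splitOnP_ne_nil _ _)
  | cons x xs => simp [List.modifyHead]

theorem splitP_not_mem {a : List Char} (h : '\n' ∉ a) : a.splitOnP (· == '\n') = [a] := by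
  induction a with
  | nil => rfl
  | cons c rest ih =>
    have hc : c ≠ '\n' := fun hh => h (by simp [hh])
    rw [List.splitOnP_cons, if_neg (by simp [hc]), ih (fun hh => h (List.mem_cons_of_mem _ hh))]
    rfl

theorem splitP_append {a : List Char} (b : List Char) (ha : '\n' ∉ a) :
    (a ++ '\n' :: b).splitOnP (· == '\n') = a :: b.splitOnP (· == '\n') := by
  induction a with
  | nil => simp [List.splitOnP_cons]
  | cons c rest ih =>
    have hc : c ≠ '\n' := fun hh => ha (by simp [hh])
    rw [List.cons_append, List.splitOnP_cons, if_neg (by simp [hc]),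
      ih (fun hh => ha (List.mem_cons_of_mem _ hh))]
    rfl

theorem join_splitP (cs : List Char) :
    PySem.Chars.join ['\n'] (cs.splitOnP (· == '\n')) = cs := by
  have := List.intercalate_splitOn (xs := cs) (x := '\n')
  simpa [List.splitOn, PySem.Chars.join] using this

theorem loopC_ne_nil {L : List (List Char)} (h : L ≠ []) : loopC L ≠ [] := by
  cases L with
  | nil => exact absurd rfl h
  | cons r rs =>
    by_cases hr : PySem.Chars.isIn Mk r = true <;> simp [loopC, hr]

theorem join_cons_ne_nil (x : List Char) {L : List (List Char)} (h : L ≠ []) :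
    PySem.Chars.join ['\n'] (x :: L) = x ++ '\n' :: PySem.Chars.join ['\n'] L := by
  cases L with
  | nil => exact absurd rfl h
  | cons y ys => rw [PySem.Chars.join_cons_cons]; simp

theorem first_nl {cs : List Char} (h : '\n' ∈ cs) :
    ∃ a b, cs = a ++ '\n' :: b ∧ '\n' ∉ a := by
  induction cs with
  | nil => cases h
  | cons c rest ih =>
    by_cases hc : c = '\n'
    · exact ⟨[], rest, by simp [hc], by simp⟩
    · obtain ⟨a, b, heq, hna⟩ := ih (by
        rcases List.mem_cons.mp h with h1 | h2
        · exact absurd h1.symm hc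
        · exact h2)
      exact ⟨c :: a, b, by simp [heq], by
        intro hm
        rcases List.mem_cons.mp hm with h1 | h2
        · exact hc h1.symm
        · exact hna h2⟩

theorem find_eq_of (s sub : List Char) (k : Nat) (_hk : k ≤ s.length)
    (h1 : sub <+: s.drop k) (h2 : ∀ i < k, ¬ sub <+: s.drop i) :
    PySem.Chars.find s sub = (k : Int) := by
  have hin : sub <:+: s := h1.isInfix.trans (List.drop_suffix k s).isInfix
  have hpos : 0 ≤ PySem.Chars.find s sub := (PySem.Chars.find_nonneg_iff s sub).mpr hin
  obtain ⟨hp, hmin⟩ := PySem.Chars.find_spec hpos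
  have h3 : ¬ (PySem.Chars.find s sub).toNat < k := fun hlt => h2 _ hlt hp
  have h4 : ¬ k < (PySem.Chars.find s sub).toNat := fun hlt => hmin k hlt h1
  omega

theorem no_nl_prefix {a : List Char} (b : List Char) (ha : '\n' ∉ a) {j : Nat} (hj : j < a.length) :
    ¬ ['\n'] <+: (a ++ '\n' :: b).drop j := by
  intro h
  rw [List.drop_append_of_le_length (by omega)] at h
  rw [List.drop_eq_getElem_cons hj] at h
  rw [List.cons_append, List.cons_prefix_cons] at h
  exact ha (h.1 ▸ List.getElem_mem hj)

theorem no_M_at {a : List Char} (b : List Char) (hna : ¬ Mk <:+: a) {i : Nat} (hi : i ≤ a.length) :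
    ¬ Mk <+: (a ++ '\n' :: b).drop i := by
  intro h
  rw [List.drop_append_of_le_length hi] at h
  by_cases hlen : Mk.length ≤ (a.drop i).length
  · have : Mk <+: a.drop i := by
      rw [List.prefix_iff_eq_take] at h ⊢
      rwa [List.take_append_of_le_length hlen] at h
    exact hna (this.isInfix.trans (List.drop_suffix i a).isInfix)
  · have hmem : '\n' ∈ Mk := by
      rw [List.prefix_iff_eq_take,
        List.take_append,
        List.take_of_length_le (by omega)] at h
      have h2 : Mk = a.drop i ++ List.take (Mk.length - (a.drop i).length) ('\n' :: b) := h
      have h3 : 1 ≤ Mk.length - (a.drop i).length := by omega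
      rw [show List.take (Mk.length - (a.drop i).length) ('\n' :: b)
          = '\n' :: List.take (Mk.length - (a.drop i).length - 1) b by
        cases h4 : Mk.length - (a.drop i).length with
        | zero => omega
        | succ m => simp [List.take_succ_cons]] at h2
      rw [h2]
      simp
    exact nl_not_mem_Mk hmem

theorem drop_shift (a b : List Char) (c : Char) (m : Nat) :
    (a ++ c :: b).drop (a.length + 1 + m) = b.drop m := by
  rw [show a ++ c :: b = (a ++ [c]) ++ b by simp,
    show a.length + 1 + m = (a ++ [c]).length + m by simp]
  exact List.drop_length_add_append m

theorem take_shift (a b : List Char) (c : Char) (m : Nat) :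
    (a ++ c :: b).take (a.length + 1 + m) = a ++ c :: b.take m := by
  rw [List.take_append, List.take_of_length_le (by omega),
    show a.length + 1 + m - a.length = m + 1 by omega, List.take_succ_cons]

theorem main_lemma : ∀ (n : Nat) (cs : List Char), cs.length ≤ n →
    PySem.Chars.join ['\n'] (loopC (cs.splitOnP (· == '\n'))) = fBchars cs := by
  intro n
  induction n with
  | zero =>
    intro cs h
    have h0 : cs = [] := List.eq_nil_of_length_eq_zero (by omega)
    subst h0
    decide
  | succ n ih =>
    intro cs hlen
    by_cases hmem : '\n' ∈ cs
    · obtain ⟨a, b, rfl, hna⟩ := first_nl hmem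
      rw [splitP_append b hna]
      have hblen : b.length ≤ n := by simp at hlen; omega
      have hlens : (a ++ '\n' :: b).length = a.length + 1 + b.length := by simp; omega
      by_cases hMa : PySem.Chars.isIn Mk a = true
      · -- marker occurs in the first line a
        have hMa' : Mk <:+: a := (PySem.Chars.isIn_iff_infix _ _).mp hMa
        have hMs : Mk <:+: (a ++ '\n' :: b) :=
          hMa'.trans (List.prefix_append a ('\n' :: b)).isInfix
        have hpos : 0 ≤ PySem.Chars.find (a ++ '\n' :: b) Mk :=
          (PySem.Chars.find_nonneg_iff _ _).mpr hMs
        have hne : PySem.Chars.find (a ++ '\n' :: b) Mk ≠ -1 := by omega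
        obtain ⟨pre, suf1, hdecomp⟩ := hMa'
        have hprelen : pre.length ≤ a.length := by
          rw [← hdecomp]; simp
        have hprefix : Mk <+: (a ++ '\n' :: b).drop pre.length := by
          rw [show (a ++ '\n' :: b) = pre ++ (Mk ++ (suf1 ++ '\n' :: b)) by
            rw [← hdecomp]; simp,
            show pre.length = pre.length + 0 by omega,
            List.drop_length_add_append, List.drop_zero]
          exact List.prefix_append Mk _
        have hple : (PySem.Chars.find (a ++ '\n' :: b) Mk).toNat ≤ a.length := by
          by_contra hgt
          obtain ⟨_, hmin⟩ := PySem.Chars.find_spec hpos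
          exact hmin pre.length (by omega) hprefix
        have hfd : PySem.Chars.find
            ((a ++ '\n' :: b).drop (PySem.Chars.find (a ++ '\n' :: b) Mk).toNat) ['\n']
            = ((a.length - (PySem.Chars.find (a ++ '\n' :: b) Mk).toNat : Nat) : Int) := by
          apply find_eq_of
          · rw [List.length_drop, hlens]; omega
          · rw [List.drop_drop,
              show (PySem.Chars.find (a ++ '\n' :: b) Mk).toNat
                + (a.length - (PySem.Chars.find (a ++ '\n' :: b) Mk).toNat)
                = a.length + 0 by omega,
              List.drop_length_add_append, List.drop_zero]
            exact ⟨b, rfl⟩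
          · intro i hi
            rw [List.drop_drop]
            exact no_nl_prefix b hna (by omega)
        have hff : PySem.Chars.findFrom (a ++ '\n' :: b) ['\n']
            (PySem.Chars.find (a ++ '\n' :: b) Mk) none = (a.length : Int) := by
          rw [show PySem.Chars.find (a ++ '\n' :: b) Mk
              = (((PySem.Chars.find (a ++ '\n' :: b) Mk).toNat : Nat) : Int)
            from (Int.toNat_of_nonneg hpos).symm]
          rw [PySem.Chars.findFrom_natCast _ _ _ (by rw [hlens]; omega), hfd]
          rw [if_neg (by omega)]
          omega
        simp only [loopC, hMa, if_true]
        rw [join_cons_ne_nil a (by simp), join_cons_ne_nil Tline (List.splitOnP_ne_nil _ _),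
          join_splitP]
        simp only [fBchars]
        rw [if_neg hne, hff, if_neg (by omega), Int.toNat_natCast,
          show (a ++ '\n' :: b) = a ++ ('\n' :: b) from rfl, List.take_left, List.drop_left]
        simp
      · -- marker does not occur in the first line a
        have hna2 : ¬ Mk <:+: a := by
          rw [← PySem.Chars.isIn_iff_infix]; simpa using hMa
        simp only [loopC, hMa, Bool.false_eq_true, if_false]
        rw [join_cons_ne_nil a (loopC_ne_nil (List.splitOnP_ne_nil _ _)), ih b hblen]
        by_cases hfs : PySem.Chars.find (a ++ '\n' :: b) Mk = -1
        · have hfb : PySem.Chars.find b Mk = -1 := by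
            rw [PySem.Chars.find_eq_neg_one_iff] at hfs ⊢
            intro hinf
            exact hfs (hinf.trans ((List.suffix_cons '\n' b).trans
              (List.suffix_append a ('\n' :: b))).isInfix)
          simp [fBchars, hfs, hfb]
        · have hMs : Mk <:+: (a ++ '\n' :: b) :=
            (PySem.Chars.find_ne_neg_one_iff _ _).mp hfs
          have hMb : Mk <:+: b := by
            obtain ⟨u, v, huv⟩ := hMs
            have hpref : Mk <+: (a ++ '\n' :: b).drop u.length := by
              rw [show (a ++ '\n' :: b) = u ++ (Mk ++ v) by rw [← huv]; simp,
                show u.length = u.length + 0 by omega,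
                List.drop_length_add_append, List.drop_zero]
              exact List.prefix_append Mk v
            by_cases hja : u.length ≤ a.length
            · exact absurd hpref (no_M_at b hna2 hja)
            · rw [show u.length = a.length + 1 + (u.length - a.length - 1) by omega,
                drop_shift] at hpref
              exact hpref.isInfix.trans (List.drop_suffix _ b).isInfix
          have hpb : 0 ≤ PySem.Chars.find b Mk :=
            (PySem.Chars.find_nonneg_iff _ _).mpr hMb
          have hpbne : PySem.Chars.find b Mk ≠ -1 := by omega
          have hpble : (PySem.Chars.find b Mk).toNat ≤ b.length := by
            have := PySem.Chars.find_le_length b Mk; omega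
          obtain ⟨hbpre, hbmin⟩ := PySem.Chars.find_spec hpb
          have hp : PySem.Chars.find (a ++ '\n' :: b) Mk
              = ((a.length + 1 + (PySem.Chars.find b Mk).toNat : Nat) : Int) := by
            apply find_eq_of
            · rw [hlens]; omega
            · rw [drop_shift]; exact hbpre
            · intro i hi
              by_cases hia : i ≤ a.length
              · exact no_M_at b hna2 hia
              · rw [show i = a.length + 1 + (i - a.length - 1) by omega, drop_shift]
                exact hbmin (i - a.length - 1) (by omega)
          have hffs : PySem.Chars.findFrom (a ++ '\n' :: b) ['\n']
              (PySem.Chars.find (a ++ '\n' :: b) Mk) none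
              = if PySem.Chars.find (b.drop (PySem.Chars.find b Mk).toNat) ['\n'] = -1 then -1
                else ((a.length + 1 + (PySem.Chars.find b Mk).toNat : Nat) : Int)
                  + PySem.Chars.find (b.drop (PySem.Chars.find b Mk).toNat) ['\n'] := by
            rw [hp, PySem.Chars.findFrom_natCast _ _ _ (by rw [hlens]; omega), drop_shift]
          have hffb : PySem.Chars.findFrom b ['\n'] (PySem.Chars.find b Mk) none
              = if PySem.Chars.find (b.drop (PySem.Chars.find b Mk).toNat) ['\n'] = -1 then -1
                else (((PySem.Chars.find b Mk).toNat : Nat) : Int)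
                  + PySem.Chars.find (b.drop (PySem.Chars.find b Mk).toNat) ['\n'] := by
            rw [show PySem.Chars.find b Mk = (((PySem.Chars.find b Mk).toNat : Nat) : Int)
              from (Int.toNat_of_nonneg hpb).symm]
            rw [PySem.Chars.findFrom_natCast _ _ _ hpble]
            simp only [Int.toNat_natCast]
          have hfsne : PySem.Chars.find (a ++ '\n' :: b) Mk ≠ -1 := hfs
          by_cases hr : PySem.Chars.find (b.drop (PySem.Chars.find b Mk).toNat) ['\n'] = -1
          · rw [if_pos hr] at hffs hffb
            simp only [fBchars]
            rw [if_neg hfsne, if_neg hpbne, hffs, hffb, if_pos rfl, if_pos rfl]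
            simp
          · have hr0 : 0 ≤ PySem.Chars.find (b.drop (PySem.Chars.find b Mk).toNat) ['\n'] := by
              have := PySem.Chars.neg_one_le_find (b.drop (PySem.Chars.find b Mk).toNat) ['\n']
              omega
            rw [if_neg hr] at hffs hffb
            simp only [fBchars]
            rw [if_neg hfsne, if_neg hpbne, hffs, hffb,
              if_neg (by omega), if_neg (by omega)]
            rw [show (((a.length + 1 + (PySem.Chars.find b Mk).toNat : Nat) : Int)
                + PySem.Chars.find (b.drop (PySem.Chars.find b Mk).toNat) ['\n']).toNat
              = a.length + 1 + ((((PySem.Chars.find b Mk).toNat : Nat) : Int)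
                + PySem.Chars.find (b.drop (PySem.Chars.find b Mk).toNat) ['\n']).toNat by omega]
            rw [take_shift, drop_shift]
            simp
    · -- no newline in cs
      rw [splitP_not_mem hmem]
      by_cases hM : PySem.Chars.isIn Mk cs = true
      · have hMs : Mk <:+: cs := (PySem.Chars.isIn_iff_infix _ _).mp hM
        have hpos : 0 ≤ PySem.Chars.find cs Mk :=
          (PySem.Chars.find_nonneg_iff _ _).mpr hMs
        have hne : PySem.Chars.find cs Mk ≠ -1 := by omega
        have hd : PySem.Chars.find (cs.drop (PySem.Chars.find cs Mk).toNat) ['\n'] = -1 := by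
          rw [PySem.Chars.find_eq_neg_one_iff]
          intro hinf
          obtain ⟨u, v, huv⟩ := hinf
          exact hmem (List.mem_of_mem_drop (huv ▸ (by simp : '\n' ∈ u ++ ['\n'] ++ v)))
        have hff : PySem.Chars.findFrom cs ['\n'] (PySem.Chars.find cs Mk) none = -1 := by
          rw [show PySem.Chars.find cs Mk = (((PySem.Chars.find cs Mk).toNat : Nat) : Int)
            from (Int.toNat_of_nonneg hpos).symm]
          rw [PySem.Chars.findFrom_natCast _ _ _
            (by have := PySem.Chars.find_le_length cs Mk; omega), hd, if_pos rfl]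
        simp only [loopC, hM, if_true]
        rw [PySem.Chars.join_cons_cons, PySem.Chars.join_singleton]
        simp only [fBchars]
        rw [if_neg hne, hff, if_pos rfl]
        simp
      · have hfind : PySem.Chars.find cs Mk = -1 := by
          rw [PySem.Chars.find_eq_neg_one_iff, ← PySem.Chars.isIn_iff_infix]
          simpa using hM
        simp only [loopC, hM, Bool.false_eq_true, if_false]
        rw [PySem.Chars.join_singleton]
        simp [fBchars, hfind]

theorem alt_eq (d : String) : fix_print_alt (some d) = String.ofList (fBchars d.toList) := by
  have hM : ("mp_obj_t mp_builtin_print" : String).toList = Mk := rfl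
  have hNL : ("\n" : String).toList = ['\n'] := rfl
  simp only [fix_print_alt, fBchars, PySem.Str.find_eq, PySem.Str.findFrom_eq, hM, hNL]
  by_cases hfind : PySem.Chars.find d.toList Mk = -1
  · simp [hfind]
  · have hpos : 0 ≤ PySem.Chars.find d.toList Mk := by
      have := PySem.Chars.neg_one_le_find d.toList Mk; omega
    have hkle : (PySem.Chars.find d.toList Mk).toNat ≤ d.toList.length := by
      have := PySem.Chars.find_le_length d.toList Mk; omega
    rw [if_neg hfind, if_neg hfind]
    by_cases hnl : PySem.Chars.findFrom d.toList ['\n'] (PySem.Chars.find d.toList Mk) none = -1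
    · rw [if_pos hnl, if_pos hnl]
      rw [show ('\n' :: Tline) = ("\n// TODO: return mp_const_none;" : String).toList from rfl,
        ← String.toList_append, String.ofList_toList]
    · have hnl0 : 0 ≤ PySem.Chars.findFrom d.toList ['\n']
          (PySem.Chars.find d.toList Mk) none := by
        rw [show PySem.Chars.find d.toList Mk
            = (((PySem.Chars.find d.toList Mk).toNat : Nat) : Int)
          from (Int.toNat_of_nonneg hpos).symm,
          PySem.Chars.findFrom_natCast _ _ _ hkle] at hnl ⊢
        by_cases hrr : PySem.Chars.find
            (d.toList.drop (PySem.Chars.find d.toList Mk).toNat) ['\n'] = -1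
        · simp [hrr] at hnl
        · rw [if_neg hrr]
          have := PySem.Chars.neg_one_le_find
            (d.toList.drop (PySem.Chars.find d.toList Mk).toNat) ['\n']
          omega
      rw [if_neg hnl, if_neg hnl]
      have hL : (PySem.Str.slice d none
            (some (PySem.Chars.findFrom d.toList ['\n'] (PySem.Chars.find d.toList Mk) none))
          ++ "\n// TODO: return mp_const_none;"
          ++ PySem.Str.slice d
            (some (PySem.Chars.findFrom d.toList ['\n'] (PySem.Chars.find d.toList Mk) none))
            none).toList
          = d.toList.take (PySem.Chars.findFrom d.toList ['\n']
              (PySem.Chars.find d.toList Mk) none).toNat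
            ++ ('\n' :: Tline)
            ++ d.toList.drop (PySem.Chars.findFrom d.toList ['\n']
              (PySem.Chars.find d.toList Mk) none).toNat := by
        rw [String.toList_append, String.toList_append, PySem.Str.toList_slice,
          PySem.Str.toList_slice, PySem.Chars.slice_eq_listSlice, PySem.Chars.slice_eq_listSlice,
          PySem.List.slice_to _ hnl0, PySem.List.slice_from _ hnl0]
        rfl
      calc _ = String.ofList (PySem.Str.slice d none
            (some (PySem.Chars.findFrom d.toList ['\n'] (PySem.Chars.find d.toList Mk) none))
          ++ "\n// TODO: return mp_const_none;"
          ++ PySem.Str.slice d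
            (some (PySem.Chars.findFrom d.toList ['\n'] (PySem.Chars.find d.toList Mk) none))
            none).toList := String.ofList_toList.symm
        _ = _ := by rw [hL]

-- ===== VERDICT (by name: the statement is the Claim_ definition above) =====
theorem fix_print_spec : Claim_equal_fix_print := by
  unfold Claim_equal_fix_print
  intro data _hdom
  unfold Spec_fix_print
  cases data with
  | none => rfl
  | some d =>
    rw [alt_eq]
    simp only [fix_print]
    have hsplit : PySem.Str.split? d "\n"
        = some ((PySem.Chars.splitOn d.toList ['\n']).map String.ofList) := by
      simp [PySem.Str.split?, PySem.Chars.split?]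
    rw [hsplit]
    simp only [Option.getD_some]
    rw [splitOn_bridge, go_map, goC_eq_loopC _ _ 0 List.drop_zero]
    simp only [List.take_zero, List.nil_append]
    have hjoin : ∀ X : List (List Char),
        PySem.Str.join "\n" (X.map String.ofList)
          = String.ofList (PySem.Chars.join ['\n'] X) := by
      intro X
      simp [PySem.Str.join, List.map_map, Function.comp_def]
    rw [hjoin, main_lemma d.toList.length d.toList le_rfl]
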